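-- pv_equiv track=rewrite | github.com/Metamess/AdventOfCode | 2023/days/day5.py | get_lowest_number_after_maps
-- ===== SOURCE A (Python) =====
-- def get_lowest_number_after_maps(seed_ranges: list[tuple[int, int]], maps: dict[str, list[list[int]]]) -> int:
--     # Sort map ranges descending by src per map, and value ranges descending by start, so we can consume them as a stack
--     maps_list = [sorted(map_range, reverse=True) for map_range in maps.values()]
--     value_ranges = sorted(seed_ranges, reverse=True)
--
--     # Apply mapping for each map
--     for i, map_ranges in enumerate(maps_list):
--         next_map_value_ranges = []
--
--         src_start, src_end, offset = 0, 0, 0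
--         while value_ranges:
--             # Each value range is a (start, end) tuple
--             val_start, val_end = value_ranges.pop()
--
--             # Pop new map range while they are "behind" the current value range
--             while map_ranges and val_start >= src_end:
--                 # Each map range is a (src, src_end, offset) tuple
--                 src_start, src_end, offset = map_ranges.pop()
--
--             if val_start >= src_end:
--                 # There's no more map ranges, but still value ranges
--                 next_map_value_ranges.append((val_start, val_end))
--                 continue
--
--             # Check for a value range before the map range
--             if val_start < src_start:
--                 # Record any part of the value range that falls before the map range
--                 next_map_value_ranges.append((val_start, min(src_start, val_end)))
--                 if src_start <= val_end:
--                     # Value range continues inside map range, add as new range to this iteration's stack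
--                     value_ranges.append((src_start, val_end))
--                 continue
--
--             # There's a value range inside the map range, and these values get an offset
--             inside = (max(src_start, val_start) + offset, min(val_end, src_end) + offset)
--             next_map_value_ranges.append(inside)
--             if val_end > src_end:
--                 # Value range continues outside of map range, add as new range to this iteration's stack
--                 value_ranges.append((src_end, val_end))
--
--         # Sort the new value ranges in descending order
--         value_ranges = sorted(next_map_value_ranges, reverse=True)
--
--     return value_ranges[-1][0]
-- ===== SOURCE B (Python) =====
-- def _consume(vs, ve, rules, st):
--     """Map the single value range (vs, ve) through the layer.
--
--     rules is the ascending list of not-yet-reached map rules, st the current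
--     rule (src_start, src_end, offset).  Returns the produced output pieces
--     together with the remaining rules and the current rule.
--     """
--     while rules and vs >= st[1]:
--         r, rules = rules[0], rules[1:]
--         st = (r[0], r[1], r[2])
--     ss, se, off = st
--     if vs >= se:
--         return [(vs, ve)], rules, st
--     if vs < ss:
--         head = (vs, min(ss, ve))
--         if ss <= ve:
--             more, rules, st = _consume(ss, ve, rules, st)
--             return [head] + more, rules, st
--         return [head], rules, st
--     head = (max(ss, vs) + off, min(ve, se) + off)
--     if ve > se:
--         more, rules, st = _consume(se, ve, rules, st)
--         return [head] + more, rules, st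
--     return [head], rules, st
--
--
-- def get_lowest_number_after_maps(seed_ranges: list[tuple[int, int]], maps: dict[str, list[list[int]]]) -> int:
--     ranges = sorted(seed_ranges)
--     for rule_list in maps.values():
--         rules = sorted(rule_list)
--         st = (0, 0, 0)
--         out = []
--         for vs, ve in ranges:
--             pieces, rules, st = _consume(vs, ve, rules, st)
--             out.extend(pieces)
--         ranges = sorted(out)
--     return min(s for s, _ in ranges)
-- ===== Notes on version B (the rewrite author's own statement) =====
-- stated objective: alternative
-- what changed: Each layer folds the ascending-sorted value ranges through a recursive per-range splitter that threads (remaining rules, current rule) as explicit state and returns the produced pieces, instead of A's descending sorts consumed as mutable pop/append work stacks with an outer while loop; the final answer is the minimum of the range starts instead of indexing the last element of a reverse-sorted list.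
-- outside the precondition, e.g. on get_lowest_number_after_maps([(-5, -1)], {'m': [[0, 3, 1, 9]]}): A returns -5, B returns -5
import Mathlib
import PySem

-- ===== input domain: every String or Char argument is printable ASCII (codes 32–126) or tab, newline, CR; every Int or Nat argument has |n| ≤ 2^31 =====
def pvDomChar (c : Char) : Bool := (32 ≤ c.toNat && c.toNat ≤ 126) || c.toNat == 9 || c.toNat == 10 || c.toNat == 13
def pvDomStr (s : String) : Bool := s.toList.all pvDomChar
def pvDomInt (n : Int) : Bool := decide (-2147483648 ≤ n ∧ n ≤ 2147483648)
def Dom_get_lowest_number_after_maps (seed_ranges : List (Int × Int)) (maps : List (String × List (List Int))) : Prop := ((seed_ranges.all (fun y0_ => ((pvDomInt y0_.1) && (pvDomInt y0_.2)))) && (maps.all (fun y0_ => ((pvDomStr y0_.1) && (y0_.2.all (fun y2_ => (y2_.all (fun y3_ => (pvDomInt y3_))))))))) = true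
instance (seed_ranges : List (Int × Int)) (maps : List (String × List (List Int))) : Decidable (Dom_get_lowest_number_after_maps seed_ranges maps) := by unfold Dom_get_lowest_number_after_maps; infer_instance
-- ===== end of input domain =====

-- B re-decomposes A's pop/append work-stack sweep as a fold with a recursive per-range
-- splitter and takes the minimum start instead of indexing a reverse-sorted list
-- (objective: alternative structure, same cost).

-- ===== PORT A =====
-- Python stacks (popped/appended at the END) are kept top-first here: pop() = head, append = cons;
-- the port therefore feeds the REVERSE of the descending-sorted Python lists to the loop.

-- inner 'while map_ranges and val_start >= src_end' loop; tuple unpacking of a rule whose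
-- length is not 3 raises ValueError in Python (excluded by Pre_; default (0,0,0) here)
def pvA_popRules (vs : Int) : List (List Int) → Int × Int × Int → List (List Int) × (Int × Int × Int)
  | [], st => ([], st)
  | r :: rest, st =>
    if vs ≥ st.2.1 then
      pvA_popRules vs rest (match r with | [a, b, c] => (a, b, c) | _ => (0, 0, 0))
    else (r :: rest, st)

-- the 'while value_ranges' loop; acc is next_map_value_ranges
def pvA_layer : List (Int × Int) → List (List Int) → Int × Int × Int → List (Int × Int) → List (Int × Int)
  | [], _, _, acc => acc
  | (vs, ve) :: stack, rules, st, acc =>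
    match pvA_popRules vs rules st with
    | (rules', ss, se, off) =>
      if vs ≥ se then pvA_layer stack rules' (ss, se, off) (acc ++ [(vs, ve)])
      else if vs < ss then
        if ss ≤ ve then pvA_layer ((ss, ve) :: stack) rules' (ss, se, off) (acc ++ [(vs, min ss ve)])
        else pvA_layer stack rules' (ss, se, off) (acc ++ [(vs, min ss ve)])
      else
        if ve > se then pvA_layer ((se, ve) :: stack) rules' (ss, se, off) (acc ++ [(max ss vs + off, min ve se + off)])
        else pvA_layer stack rules' (ss, se, off) (acc ++ [(max ss vs + off, min ve se + off)])
termination_by vr _ _ _ => (vr.map (fun p => (p.2 - p.1).toNat + 1)).sum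
decreasing_by all_goals (simp_all; try omega)

def get_lowest_number_after_maps (seed_ranges : List (Int × Int)) (maps : List (String × List (List Int))) : Int :=
  let maps_list := ((PySem.Dict.ofList maps).values).map (fun m => PySem.List.sorted m (fun x => x) true)
  let init := PySem.List.sorted2 seed_ranges (fun p => p.1) (fun p => p.2) true
  let final := maps_list.foldl
    (fun vr mr => PySem.List.sorted2 (pvA_layer vr.reverse mr.reverse (0, 0, 0) []) (fun p => p.1) (fun p => p.2) true)
    init
  -- value_ranges[-1][0]: IndexError on an empty list is excluded by Pre_
  ((PySem.List.pyGet? final (-1)).getD (0, 0)).1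

-- ===== PORT B =====
-- the 'while rules and vs >= st[1]' loop of _consume; r[0]/r[1]/r[2] on a short rule
-- raises IndexError in Python (excluded by Pre_; 0 here)
def pvB_advance (vs : Int) : List (List Int) → Int × Int × Int → List (List Int) × (Int × Int × Int)
  | [], st => ([], st)
  | r :: rest, st =>
    if vs ≥ st.2.1 then
      pvB_advance vs rest (PySem.List.pyGetD r 0 0, PySem.List.pyGetD r 1 0, PySem.List.pyGetD r 2 0)
    else (r :: rest, st)

-- _consume: map one value range through the layer, returning (pieces, rules, st)
def pvB_consume (vs ve : Int) (rules : List (List Int)) (st : Int × Int × Int) :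
    List (Int × Int) × List (List Int) × (Int × Int × Int) :=
  match pvB_advance vs rules st with
  | (rules', ss, se, off) =>
    if vs ≥ se then ([(vs, ve)], rules', (ss, se, off))
    else if vs < ss then
      if ss ≤ ve then
        match pvB_consume ss ve rules' (ss, se, off) with
        | (more, rules'', st'') => ((vs, min ss ve) :: more, rules'', st'')
      else ([(vs, min ss ve)], rules', (ss, se, off))
    else if ve > se then
      match pvB_consume se ve rules' (ss, se, off) with
      | (more, rules'', st'') => ((max ss vs + off, min ve se + off) :: more, rules'', st'')
    else ([(max ss vs + off, min ve se + off)], rules', (ss, se, off))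
termination_by (ve - vs).toNat
decreasing_by all_goals omega

-- the 'for vs, ve in ranges' loop of one layer
def pvB_layer : List (Int × Int) → List (List Int) → Int × Int × Int → List (Int × Int)
  | [], _, _ => []
  | (vs, ve) :: rest, rules, st =>
    match pvB_consume vs ve rules st with
    | (pieces, rules', st') => pieces ++ pvB_layer rest rules' st'

def get_lowest_number_after_maps_alt (seed_ranges : List (Int × Int)) (maps : List (String × List (List Int))) : Int :=
  let final := ((PySem.Dict.ofList maps).values).foldl
    (fun ranges rule_list =>
      PySem.List.sorted2 (pvB_layer ranges (PySem.List.sorted rule_list (fun x => x) false) (0, 0, 0))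
        (fun p => p.1) (fun p => p.2) false)
    (PySem.List.sorted2 seed_ranges (fun p => p.1) (fun p => p.2) false)
  -- min(s for s, _ in ranges); ValueError on an empty list is excluded by Pre_
  ((PySem.List.min? (final.map (fun p => p.1)) (fun x => x)).getD 0)

-- ===== PRECONDITION & SPEC =====
-- Pre_ excludes empty seed_ranges (A raises IndexError there) and inputs containing a map
-- rule whose length is not exactly 3 (A's tuple unpacking raises ValueError when such a
-- rule is consumed; the exclusion is conservative — a malformed rule that no value range
-- ever reaches leaves A returning normally, and B returns the same value there).
def Pre_get_lowest_number_after_maps (seed_ranges : List (Int × Int)) (maps : List (String × List (List Int))) : Prop :=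
  seed_ranges ≠ [] ∧ ∀ kv ∈ maps, ∀ r ∈ kv.2, r.length = 3
instance (seed_ranges : List (Int × Int)) (maps : List (String × List (List Int))) : Decidable (Pre_get_lowest_number_after_maps seed_ranges maps) := by unfold Pre_get_lowest_number_after_maps; infer_instance

def pvWitness_get_lowest_number_after_maps : (List (Int × Int)) × (List (String × List (List Int))) :=
  ([(79, 93), (55, 68)], [("seed-to-soil", [[98, 100, -48], [50, 98, 2]])])

def Spec_get_lowest_number_after_maps (seed_ranges : List (Int × Int)) (maps : List (String × List (List Int))) (out : Int) : Prop := out = get_lowest_number_after_maps_alt seed_ranges maps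
instance (seed_ranges : List (Int × Int)) (maps : List (String × List (List Int))) (out : Int) : Decidable (Spec_get_lowest_number_after_maps seed_ranges maps out) := by unfold Spec_get_lowest_number_after_maps; infer_instance

-- ===== CLAIM (what is proved, stated in full; the proofs are below) =====
def Claim_equal_get_lowest_number_after_maps : Prop := ∀ (seed_ranges : List (Int × Int)) (maps : List (String × List (List Int))), Dom_get_lowest_number_after_maps seed_ranges maps → Pre_get_lowest_number_after_maps seed_ranges maps → Spec_get_lowest_number_after_maps seed_ranges maps (get_lowest_number_after_maps seed_ranges maps)

-- ===== LEMMAS AND PROOFS =====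

def pvLeL (a b : List Int) : Prop := ¬ b < a

theorem pv_leL_trans (a b c : List Int) (hab : pvLeL a b) (hbc : pvLeL b c) : pvLeL a c := by
  intro hca
  rcases lt_trichotomy b a with h | h | h
  · exact hab h
  · exact hbc (h ▸ hca)
  · exact hbc (List.lt_trans hca h)

def pvLe2 (a b : Int × Int) : Prop := a.1 < b.1 ∨ (a.1 = b.1 ∧ a.2 ≤ b.2)

theorem pv_insertBy_pairwise {α : Type} (R : α → α → Prop)
    (htrans : ∀ a b c, R a b → R b c → R a c)
    (before : α → α → Bool)
    (hbt : ∀ a b, before a b = true → R a b)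
    (hbf : ∀ a b, before a b = false → R b a)
    (x : α) (ys : List α) (h : ys.Pairwise R) :
    (PySem.List.insertBy before x ys).Pairwise R := by
  induction ys with
  | nil => simp [PySem.List.insertBy]
  | cons y ys ih =>
    rw [List.pairwise_cons] at h
    simp only [PySem.List.insertBy]
    by_cases hb : before x y
    · simp only [hb, if_true]
      refine List.pairwise_cons.mpr ⟨?_, List.pairwise_cons.mpr ⟨h.1, h.2⟩⟩
      intro z hz
      rcases List.mem_cons.mp hz with rfl | hz'
      · exact hbt _ _ hb
      · exact htrans _ _ _ (hbt _ _ hb) (h.1 z hz')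
    · simp only [hb, if_false, Bool.false_eq_true]
      refine List.pairwise_cons.mpr ⟨?_, ih h.2⟩
      intro z hz
      rcases (PySem.List.mem_insertBy before x z ys).mp hz with rfl | hz'
      · exact hbf _ _ (by simpa using hb)
      · exact h.1 z hz'

theorem pv_foldl_insertBy_pairwise {α : Type} (R : α → α → Prop)
    (htrans : ∀ a b c, R a b → R b c → R a c)
    (before : α → α → Bool)
    (hbt : ∀ a b, before a b = true → R a b)
    (hbf : ∀ a b, before a b = false → R b a) :
    ∀ (xs acc : List α), acc.Pairwise R →
      (xs.foldl (fun acc x => PySem.List.insertBy before x acc) acc).Pairwise R := by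
  intro xs
  induction xs with
  | nil => intro acc h; simpa using h
  | cons x xs ih =>
    intro acc h
    simpa using ih _ (pv_insertBy_pairwise R htrans before hbt hbf x acc h)

theorem pv_sorted2_pairwise (xs : List (Int × Int)) :
    (PySem.List.sorted2 xs (fun p => p.1) (fun p => p.2) false).Pairwise pvLe2 := by
  simp only [PySem.List.sorted2]
  apply pv_foldl_insertBy_pairwise pvLe2 (fun a b c hab hbc => by unfold pvLe2 at *; omega)
  · intro a b hb; simp at hb; unfold pvLe2; omega
  · intro a b hb; simp at hb; unfold pvLe2; omega
  · exact List.Pairwise.nil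

theorem pv_sorted2_pairwise_rev (xs : List (Int × Int)) :
    (PySem.List.sorted2 xs (fun p => p.1) (fun p => p.2) true).Pairwise (fun a b => pvLe2 b a) := by
  simp only [PySem.List.sorted2]
  apply pv_foldl_insertBy_pairwise _ (fun a b c hab hbc => by unfold pvLe2 at *; omega)
  · intro a b hb; simp at hb; unfold pvLe2; omega
  · intro a b hb; simp at hb; unfold pvLe2; omega
  · exact List.Pairwise.nil

theorem pv_sorted2_rev_reverse (xs : List (Int × Int)) :
    (PySem.List.sorted2 xs (fun p => p.1) (fun p => p.2) true).reverse
      = PySem.List.sorted2 xs (fun p => p.1) (fun p => p.2) false := by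
  refine List.Perm.eq_of_pairwise (le := pvLe2) ?_ ?_ ?_ ?_
  · intro a b _ _ hab hba
    rcases a with ⟨a1, a2⟩; rcases b with ⟨b1, b2⟩
    unfold pvLe2 at hab hba
    simp only [Prod.mk.injEq]
    constructor <;> omega
  · exact List.pairwise_reverse.mpr (pv_sorted2_pairwise_rev xs)
  · exact pv_sorted2_pairwise xs
  · exact (List.reverse_perm _).trans ((PySem.List.sorted2_perm xs _ _ true).trans
      (PySem.List.sorted2_perm xs _ _ false).symm)

theorem pv_sortedL_pairwise (xs : List (List Int)) :
    (PySem.List.sorted xs (fun x => x) false).Pairwise pvLeL := by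
  simp only [PySem.List.sorted]
  apply pv_foldl_insertBy_pairwise pvLeL pv_leL_trans
  · exact fun a b hb => List.lt_asymm (of_decide_eq_true hb)
  · exact fun a b hb => of_decide_eq_false hb
  · exact List.Pairwise.nil

theorem pv_sortedL_pairwise_rev (xs : List (List Int)) :
    (PySem.List.sorted xs (fun x => x) true).Pairwise (fun a b => pvLeL b a) := by
  simp only [PySem.List.sorted]
  apply pv_foldl_insertBy_pairwise (fun a b => pvLeL b a)
    (fun a b c hab hbc => pv_leL_trans c b a hbc hab)
  · exact fun a b hb => List.lt_asymm (of_decide_eq_true hb)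
  · exact fun a b hb => of_decide_eq_false hb
  · exact List.Pairwise.nil

theorem pv_sortedL_rev_reverse (xs : List (List Int)) :
    (PySem.List.sorted xs (fun x => x) true).reverse = PySem.List.sorted xs (fun x => x) false := by
  refine List.Perm.eq_of_pairwise (le := pvLeL) ?_ ?_ ?_ ?_
  · intro a b _ _ hab hba
    rcases lt_trichotomy a b with h | h | h
    · exact absurd h hba
    · exact h
    · exact absurd h hab
  · exact List.pairwise_reverse.mpr (pv_sortedL_pairwise_rev xs)
  · exact pv_sortedL_pairwise xs
  · exact (List.reverse_perm _).trans ((PySem.List.sorted_perm xs _ true).trans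
      (PySem.List.sorted_perm xs _ false).symm)

theorem pv_update_items_mem {p : String × List (List Int)} :
    ∀ (ps : List (String × List (List Int))) (d : PySem.Dict String (List (List Int))),
      p ∈ (d.update ps).items → p ∈ d.items ∨ p ∈ ps := by
  intro ps
  induction ps with
  | nil => intro d h; exact Or.inl h
  | cons q ps ih =>
    intro d h
    rcases ih (d.insert q.1 q.2) h with h' | h'
    · rcases (PySem.Dict.mem_items_insert d q.1 q.2 p).mp h' with rfl | ⟨hmem, _⟩
      · exact Or.inr (by simp)
      · exact Or.inl hmem
    · exact Or.inr (List.mem_cons_of_mem _ h')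

theorem pv_values_mem (maps : List (String × List (List Int))) :
    ∀ v ∈ (PySem.Dict.ofList maps).values, ∃ k, (k, v) ∈ maps := by
  intro v hv
  simp only [PySem.Dict.values, List.mem_map] at hv
  obtain ⟨p, hp, rfl⟩ := hv
  rcases pv_update_items_mem maps PySem.Dict.empty hp with h | h
  · simp [PySem.Dict.empty] at h
  · exact ⟨p.1, h⟩

theorem pv_pyGet_last (l : List (Int × Int)) (b : Int × Int) :
    PySem.List.pyGet? (l ++ [b]) (-1) = some b := by
  simp [PySem.List.pyGet?, PySem.List.pyIdx?]

theorem pv_foldl_min_of_le (b : Int) (l : List Int) (h : ∀ x ∈ l, b ≤ x) :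
    l.foldl min b = b := by
  induction l with
  | nil => rfl
  | cons x l ih =>
    rw [List.foldl_cons, min_eq_left (h x (by simp))]
    exact ih (fun x hx => h x (by simp [hx]))

theorem pv_min_head (b : Int × Int) (t : List (Int × Int)) (hp : (b :: t).Pairwise pvLe2) :
    (PySem.List.min? (((b :: t)).map (fun p => p.1)) (fun x => x)).getD 0 = b.1 := by
  rw [List.map_cons, PySem.List.min?_id_cons]
  rw [pv_foldl_min_of_le b.1 (t.map (fun p => p.1))
    (by
      intro x hx
      obtain ⟨y, hy, rfl⟩ := List.mem_map.mp hx
      have := (List.pairwise_cons.mp hp).1 y hy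
      unfold pvLe2 at this; omega)]
  rfl

theorem pv_advance_eq (vs : Int) (rules : List (List Int)) (st : Int × Int × Int)
    (h3 : ∀ r ∈ rules, r.length = 3) :
    pvA_popRules vs rules st = pvB_advance vs rules st := by
  induction rules generalizing st with
  | nil => rfl
  | cons r rest ih =>
    obtain ⟨a, b, c, rfl⟩ : ∃ a b c, r = [a, b, c] := by
      have hr := h3 r (by simp)
      match r, hr with | [a, b, c], _ => exact ⟨a, b, c, rfl⟩
    simp only [pvA_popRules, pvB_advance]
    split
    · exact ih _ (fun r hr => h3 r (by simp [hr]))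
    · rfl

theorem pv_advance_mem (vs : Int) (rules : List (List Int)) (st : Int × Int × Int) :
    ∀ r ∈ (pvB_advance vs rules st).1, r ∈ rules := by
  induction rules generalizing st with
  | nil => simp [pvB_advance]
  | cons r rest ih =>
    simp only [pvB_advance]
    split
    · exact fun x hx => List.mem_cons_of_mem _ (ih _ x hx)
    · exact fun x hx => hx

theorem pv_consume_ne_nil (vs ve : Int) (rules : List (List Int)) (st : Int × Int × Int) :
    (pvB_consume vs ve rules st).1 ≠ [] := by
  rw [pvB_consume.eq_def]
  rcases pvB_advance vs rules st with ⟨rules', ss, se, off⟩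
  dsimp only
  split_ifs <;> simp

theorem pv_layer_eq (stack : List (Int × Int)) (rules : List (List Int)) (st : Int × Int × Int)
    (acc : List (Int × Int)) :
    (∀ r ∈ rules, r.length = 3) →
    pvA_layer stack rules st acc = acc ++ pvB_layer stack rules st := by
  induction stack, rules, st, acc using pvA_layer.induct with
  | case1 rules st acc => intro _; simp [pvA_layer, pvB_layer]
  | case2 vs ve stack rules st acc rules' ss se off heq hge ih =>
    intro h3
    have heqB : pvB_advance vs rules st = (rules', ss, se, off) := by
      rw [← pv_advance_eq vs rules st h3]; exact heq
    have h3' : ∀ r ∈ rules', r.length = 3 := fun r hr =>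
      h3 r (pv_advance_mem vs rules st r (by rw [heqB]; exact hr))
    rw [pvA_layer, heq]
    simp only [if_pos hge]
    rw [ih h3']
    have : pvB_layer ((vs, ve) :: stack) rules st = (vs, ve) :: pvB_layer stack rules' (ss, se, off) := by
      rw [pvB_layer, pvB_consume.eq_def, heqB]
      simp [if_pos hge]
    rw [this]; simp
  | case3 vs ve stack rules st acc rules' ss se off heq h1 h2 h3c ih =>
    intro h3
    have heqB : pvB_advance vs rules st = (rules', ss, se, off) := by
      rw [← pv_advance_eq vs rules st h3]; exact heq
    have h3' : ∀ r ∈ rules', r.length = 3 := fun r hr =>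
      h3 r (pv_advance_mem vs rules st r (by rw [heqB]; exact hr))
    rw [pvA_layer, heq]
    simp only [if_neg h1, if_pos h2, if_pos h3c]
    rw [ih h3']
    rcases hc : pvB_consume ss ve rules' (ss, se, off) with ⟨more, r2, s2⟩
    have hB1 : pvB_layer ((vs, ve) :: stack) rules st
        = ((vs, min ss ve) :: more) ++ pvB_layer stack r2 s2 := by
      rw [pvB_layer, pvB_consume.eq_def, heqB]
      simp only [if_neg h1, if_pos h2, if_pos h3c, hc]
    have hB2 : pvB_layer ((ss, ve) :: stack) rules' (ss, se, off)
        = more ++ pvB_layer stack r2 s2 := by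
      rw [pvB_layer, hc]
    rw [hB1, hB2]; simp
  | case4 vs ve stack rules st acc rules' ss se off heq h1 h2 h3c ih =>
    intro h3
    have heqB : pvB_advance vs rules st = (rules', ss, se, off) := by
      rw [← pv_advance_eq vs rules st h3]; exact heq
    have h3' : ∀ r ∈ rules', r.length = 3 := fun r hr =>
      h3 r (pv_advance_mem vs rules st r (by rw [heqB]; exact hr))
    rw [pvA_layer, heq]
    simp only [if_neg h1, if_pos h2, if_neg h3c]
    rw [ih h3']
    have : pvB_layer ((vs, ve) :: stack) rules st
        = (vs, min ss ve) :: pvB_layer stack rules' (ss, se, off) := by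
      rw [pvB_layer, pvB_consume.eq_def, heqB]
      simp [if_neg h1, if_pos h2, if_neg h3c]
    rw [this]; simp
  | case5 vs ve stack rules st acc rules' ss se off heq h1 h2 h3c ih =>
    intro h3
    have heqB : pvB_advance vs rules st = (rules', ss, se, off) := by
      rw [← pv_advance_eq vs rules st h3]; exact heq
    have h3' : ∀ r ∈ rules', r.length = 3 := fun r hr =>
      h3 r (pv_advance_mem vs rules st r (by rw [heqB]; exact hr))
    rw [pvA_layer, heq]
    simp only [if_neg h1, if_neg h2, if_pos h3c]
    rw [ih h3']
    rcases hc : pvB_consume se ve rules' (ss, se, off) with ⟨more, r2, s2⟩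
    have hB1 : pvB_layer ((vs, ve) :: stack) rules st
        = ((max ss vs + off, min ve se + off) :: more) ++ pvB_layer stack r2 s2 := by
      rw [pvB_layer, pvB_consume.eq_def, heqB]
      simp only [if_neg h1, if_neg h2, if_pos h3c, hc]
    have hB2 : pvB_layer ((se, ve) :: stack) rules' (ss, se, off)
        = more ++ pvB_layer stack r2 s2 := by
      rw [pvB_layer, hc]
    rw [hB1, hB2]; simp
  | case6 vs ve stack rules st acc rules' ss se off heq h1 h2 h3c ih =>
    intro h3
    have heqB : pvB_advance vs rules st = (rules', ss, se, off) := by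
      rw [← pv_advance_eq vs rules st h3]; exact heq
    have h3' : ∀ r ∈ rules', r.length = 3 := fun r hr =>
      h3 r (pv_advance_mem vs rules st r (by rw [heqB]; exact hr))
    rw [pvA_layer, heq]
    simp only [if_neg h1, if_neg h2, if_neg h3c]
    rw [ih h3']
    have : pvB_layer ((vs, ve) :: stack) rules st
        = (max ss vs + off, min ve se + off) :: pvB_layer stack rules' (ss, se, off) := by
      rw [pvB_layer, pvB_consume.eq_def, heqB]
      simp [if_neg h1, if_neg h2, if_neg h3c]
    rw [this]; simp

theorem pv_layer_ne_nil (stack : List (Int × Int)) (rules : List (List Int)) (st : Int × Int × Int)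
    (h : stack ≠ []) : pvB_layer stack rules st ≠ [] := by
  match stack with
  | (vs, ve) :: rest =>
    rw [pvB_layer]
    rcases hc : pvB_consume vs ve rules st with ⟨pieces, r2, s2⟩
    have := pv_consume_ne_nil vs ve rules st
    rw [hc] at this
    simpa using fun h' _ => this h'


theorem pv_sorted2_ne_nil (xs : List (Int × Int)) (rev : Bool) (h : xs ≠ []) :
    PySem.List.sorted2 xs (fun p => p.1) (fun p => p.2) rev ≠ [] := by
  intro h0
  have := (PySem.List.sorted2_perm xs (fun p => p.1) (fun p => p.2) rev).length_eq
  rw [h0] at this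
  exact h (List.length_eq_zero_iff.mp this.symm)

theorem pv_fold_inv (vals : List (List (List Int)))
    (h3 : ∀ m ∈ vals, ∀ r ∈ m, r.length = 3) :
    ∀ vrB : List (Int × Int), vrB ≠ [] → vrB.Pairwise pvLe2 →
      (vals.foldl (fun vr m => PySem.List.sorted2
          (pvA_layer vr.reverse (PySem.List.sorted m (fun x => x) true).reverse (0, 0, 0) [])
          (fun p => p.1) (fun p => p.2) true) vrB.reverse
        = (vals.foldl (fun vr m => PySem.List.sorted2
            (pvB_layer vr (PySem.List.sorted m (fun x => x) false) (0, 0, 0))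
            (fun p => p.1) (fun p => p.2) false) vrB).reverse)
      ∧ (vals.foldl (fun vr m => PySem.List.sorted2
            (pvB_layer vr (PySem.List.sorted m (fun x => x) false) (0, 0, 0))
            (fun p => p.1) (fun p => p.2) false) vrB) ≠ []
      ∧ (vals.foldl (fun vr m => PySem.List.sorted2
            (pvB_layer vr (PySem.List.sorted m (fun x => x) false) (0, 0, 0))
            (fun p => p.1) (fun p => p.2) false) vrB).Pairwise pvLe2 := by
  induction vals with
  | nil =>
    intro vrB hne hpw
    exact ⟨rfl, hne, hpw⟩
  | cons m vals ih =>
    intro vrB hne hpw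
    have h3m : ∀ r ∈ PySem.List.sorted m (fun x => x) false, r.length = 3 := by
      intro r hr
      exact h3 m (by simp) r ((PySem.List.mem_sorted m (fun x => x) false r).mp hr)
    have hX : pvA_layer (vrB.reverse).reverse (PySem.List.sorted m (fun x => x) true).reverse (0, 0, 0) []
        = pvB_layer vrB (PySem.List.sorted m (fun x => x) false) (0, 0, 0) := by
      rw [List.reverse_reverse, pv_sortedL_rev_reverse]
      exact pv_layer_eq vrB _ (0, 0, 0) [] h3m
    have hXne : pvB_layer vrB (PySem.List.sorted m (fun x => x) false) (0, 0, 0) ≠ [] :=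
      pv_layer_ne_nil vrB _ (0, 0, 0) hne
    simp only [List.foldl_cons, hX]
    rw [show PySem.List.sorted2
          (pvB_layer vrB (PySem.List.sorted m (fun x => x) false) (0, 0, 0))
          (fun p => p.1) (fun p => p.2) true
        = (PySem.List.sorted2
          (pvB_layer vrB (PySem.List.sorted m (fun x => x) false) (0, 0, 0))
          (fun p => p.1) (fun p => p.2) false).reverse from
      by rw [← pv_sorted2_rev_reverse, List.reverse_reverse]]
    exact ih (fun m' hm' => h3 m' (by simp [hm'])) _
      (pv_sorted2_ne_nil _ false hXne) (pv_sorted2_pairwise _)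

-- ===== VERDICT (by name: the statement is the Claim_ definition above) =====
theorem get_lowest_number_after_maps_spec : Claim_equal_get_lowest_number_after_maps := by
  intro seed_ranges maps _ hpre
  obtain ⟨hne, h3maps⟩ := hpre
  unfold Spec_get_lowest_number_after_maps
  unfold get_lowest_number_after_maps get_lowest_number_after_maps_alt
  dsimp only
  have h3 : ∀ m ∈ (PySem.Dict.ofList maps).values, ∀ r ∈ m, r.length = 3 := by
    intro m hm r hr
    obtain ⟨k, hk⟩ := pv_values_mem maps m hm
    exact h3maps (k, m) hk r hr
  rw [List.foldl_map]
  rw [show PySem.List.sorted2 seed_ranges (fun p => p.1) (fun p => p.2) true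
      = (PySem.List.sorted2 seed_ranges (fun p => p.1) (fun p => p.2) false).reverse from
    by rw [← pv_sorted2_rev_reverse, List.reverse_reverse]]
  obtain ⟨hAB, hBne, hBpw⟩ := pv_fold_inv _ h3
    (PySem.List.sorted2 seed_ranges (fun p => p.1) (fun p => p.2) false)
    (pv_sorted2_ne_nil _ false hne) (pv_sorted2_pairwise _)
  rw [hAB]
  rcases hfB : ((PySem.Dict.ofList maps).values).foldl (fun vr m => PySem.List.sorted2
      (pvB_layer vr (PySem.List.sorted m (fun x => x) false) (0, 0, 0))
      (fun p => p.1) (fun p => p.2) false)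
      (PySem.List.sorted2 seed_ranges (fun p => p.1) (fun p => p.2) false) with _ | ⟨b, t⟩
  · exact absurd hfB hBne
  · rw [hfB] at hBpw
    rw [List.reverse_cons, pv_pyGet_last]
    simp only [Option.getD_some]
    exact (pv_min_head b t hBpw).symm
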